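-- pv_equiv track=rewrite | github.com/dimslalom/reversi | a1.py | get_intermediate_locations
-- ===== SOURCE A (Python) =====
-- def get_intermediate_locations(position: tuple[int, int], new_position: tuple[int, int]) -> list[tuple[int, int]]:
--     """
--     Returns a list of (row, column) indexes that lie directly on the line between two indexes (excluding the given indexes).
--     The returned list should be empty if the two indexes do not have a horizontal, vertical, or diagonal line between them.
--
--     Preconditions:
--
--     piece == X or piece == O
--     """
--     row_diff = new_position[0] - position[0]
--     col_diff = new_position[1] - position[1]
--     step_row = 1 if row_diff > 0 else -1
--     step_col = 1 if col_diff > 0 else -1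
--     if abs(row_diff) == abs(col_diff):
--         intermediate_locations = [(position[0] + i * step_row, position[1] + i * step_col) for i in range(1, abs(row_diff))]
--     elif row_diff == 0:
--         intermediate_locations = [(position[0], position[1] + i * step_col) for i in range(1, abs(col_diff))]
--     elif col_diff == 0:
--         intermediate_locations = [(position[0] + i * step_row, position[1]) for i in range(1, abs(row_diff))]
--     else:
--         intermediate_locations = []
--
--     return intermediate_locations
-- ===== SOURCE B (Python) =====
-- def get_intermediate_locations(position: tuple[int, int], new_position: tuple[int, int]) -> list[tuple[int, int]]:
--     row_diff = new_position[0] - position[0]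
--     col_diff = new_position[1] - position[1]
--     if row_diff != 0 and col_diff != 0 and abs(row_diff) != abs(col_diff):
--         return []
--     step_row = (row_diff > 0) - (row_diff < 0)
--     step_col = (col_diff > 0) - (col_diff < 0)
--     # Walk backwards from new_position toward position, collecting cells,
--     # then reverse: no count of steps is ever computed.
--     cells = []
--     r, c = new_position[0] - step_row, new_position[1] - step_col
--     while (r, c) != position:
--         cells.append((r, c))
--         r -= step_row
--         c -= step_col
--     cells.reverse()
--     return cells
-- ===== Notes on version B (the rewrite author's own statement) =====
-- stated objective: alternative
-- what changed: B replaces A's three counted range-comprehensions with a condition-driven pointer walk: it steps backwards from new_position toward position, collecting cells until it reaches position, and reverses the accumulator, never computing the number of steps.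
import Mathlib
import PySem

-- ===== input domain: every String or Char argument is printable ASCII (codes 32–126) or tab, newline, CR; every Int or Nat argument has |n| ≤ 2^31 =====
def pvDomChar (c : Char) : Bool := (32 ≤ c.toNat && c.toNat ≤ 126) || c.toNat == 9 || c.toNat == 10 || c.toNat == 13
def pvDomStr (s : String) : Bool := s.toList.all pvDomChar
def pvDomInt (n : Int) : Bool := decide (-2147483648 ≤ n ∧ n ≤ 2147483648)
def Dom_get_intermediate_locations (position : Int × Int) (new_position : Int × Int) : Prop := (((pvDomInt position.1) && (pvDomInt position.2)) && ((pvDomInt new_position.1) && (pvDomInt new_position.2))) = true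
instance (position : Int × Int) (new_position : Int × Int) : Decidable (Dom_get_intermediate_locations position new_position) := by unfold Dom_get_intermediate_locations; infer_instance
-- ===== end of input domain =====

-- B walks backwards cell by cell from new_position until it reaches position and reverses the
-- collected cells, instead of A's three counted range-comprehensions (objective: alternative).
-- ===== PORT A =====
def get_intermediate_locations (position : Int × Int) (new_position : Int × Int) : List (Int × Int) :=
  let row_diff := new_position.1 - position.1
  let col_diff := new_position.2 - position.2
  let step_row : Int := if row_diff > 0 then 1 else -1
  let step_col : Int := if col_diff > 0 then 1 else -1
  if |row_diff| = |col_diff| then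
    (PySem.List.pyRange 1 |row_diff| 1).map (fun i => (position.1 + i * step_row, position.2 + i * step_col))
  else if row_diff = 0 then
    (PySem.List.pyRange 1 |col_diff| 1).map (fun i => (position.1, position.2 + i * step_col))
  else if col_diff = 0 then
    (PySem.List.pyRange 1 |row_diff| 1).map (fun i => (position.1 + i * step_row, position.2))
  else []

-- ===== PORT B =====
-- the while-loop of Source B; the fuel argument only makes the recursion total — on every call made
-- below, the loop condition stops the walk strictly before the fuel runs out
def pvWalk (target : Int × Int) (sr sc : Int) : Nat → Int × Int → List (Int × Int)
  | 0, _ => []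
  | fuel + 1, (r, c) => if (r, c) = target then [] else (r, c) :: pvWalk target sr sc fuel (r - sr, c - sc)

def get_intermediate_locations_alt (position : Int × Int) (new_position : Int × Int) : List (Int × Int) :=
  let row_diff := new_position.1 - position.1
  let col_diff := new_position.2 - position.2
  if row_diff ≠ 0 ∧ col_diff ≠ 0 ∧ |row_diff| ≠ |col_diff| then []
  else
    let step_row : Int := (if row_diff > 0 then 1 else 0) - (if row_diff < 0 then 1 else 0)
    let step_col : Int := (if col_diff > 0 then 1 else 0) - (if col_diff < 0 then 1 else 0)
    (pvWalk position step_row step_col ((|row_diff| + |col_diff|).toNat + 1)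
      (new_position.1 - step_row, new_position.2 - step_col)).reverse

-- ===== PRECONDITION & SPEC =====
def Spec_get_intermediate_locations (position : Int × Int) (new_position : Int × Int) (out : List (Int × Int)) : Prop := out = get_intermediate_locations_alt position new_position
instance (position : Int × Int) (new_position : Int × Int) (out : List (Int × Int)) : Decidable (Spec_get_intermediate_locations position new_position out) := by unfold Spec_get_intermediate_locations; infer_instance

-- ===== CLAIM (what is proved, stated in full; the proofs are below) =====
def Claim_equal_get_intermediate_locations : Prop := ∀ (position : Int × Int) (new_position : Int × Int), Dom_get_intermediate_locations position new_position → Spec_get_intermediate_locations position new_position (get_intermediate_locations position new_position)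

-- ===== LEMMAS AND PROOFS =====

-- every integer is its absolute value times its zero-aware sign
lemma pvSignMul (x : Int) :
    x = |x| * ((if x > 0 then 1 else 0) - (if x < 0 then 1 else 0)) := by
  rcases lt_trichotomy x 0 with h | h | h
  · simp [not_lt.mpr (le_of_lt h), h, abs_of_neg h]
  · simp [h]
  · simp [h, not_lt.mpr (le_of_lt h), abs_of_pos h]

-- A's ±1 step agrees with B's zero-aware sign on nonzero differences
lemma pvSign_eq (x : Int) (hx : x ≠ 0) :
    ((if x > 0 then (1:Int) else 0) - (if x < 0 then 1 else 0)) = (if x > 0 then 1 else -1) := by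
  split_ifs <;> omega

lemma pvSign_ne_zero (x : Int) (hx : x ≠ 0) :
    ((if x > 0 then (1:Int) else 0) - (if x < 0 then 1 else 0)) ≠ 0 := by
  split_ifs <;> omega

-- the walk starting k cells away from the target lists those k cells far-to-near
lemma pvWalk_spec (p : Int × Int) (sr sc : Int) (hs : ¬ (sr = 0 ∧ sc = 0)) :
    ∀ (k fuel : Nat), k ≤ fuel →
      pvWalk p sr sc fuel (p.1 + k * sr, p.2 + k * sc)
        = ((List.range k).reverse).map (fun (j : Nat) => (p.1 + ((j : Int) + 1) * sr, p.2 + ((j : Int) + 1) * sc)) := by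
  intro k
  induction k with
  | zero =>
      intro fuel _
      cases fuel with
      | zero => simp [pvWalk]
      | succ f => simp [pvWalk]
  | succ k ih =>
      intro fuel h
      obtain ⟨f, rfl⟩ : ∃ f, fuel = f + 1 := ⟨fuel - 1, by omega⟩
      have hne : (p.1 + ((k : Int) + 1) * sr, p.2 + ((k : Int) + 1) * sc) ≠ p := by
        intro hEq
        have h1 := congrArg Prod.fst hEq
        have h2 := congrArg Prod.snd hEq
        simp only [] at h1 h2
        rcases not_and_or.mp hs with h' | h'
        · have hm : ((k : Int) + 1) * sr = 0 := by omega
          rcases mul_eq_zero.mp hm with h'' | h''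
          · omega
          · exact h' h''
        · have hm : ((k : Int) + 1) * sc = 0 := by omega
          rcases mul_eq_zero.mp hm with h'' | h''
          · omega
          · exact h' h''
      have hstep1 : p.1 + ((k : Int) + 1) * sr - sr = p.1 + (k : Int) * sr := by ring
      have hstep2 : p.2 + ((k : Int) + 1) * sc - sc = p.2 + (k : Int) * sc := by ring
      have hcast : (((k : Nat) + 1 : Nat) : Int) = (k : Int) + 1 := by push_cast; ring
      rw [show ((((k : Nat) + 1 : Nat) : Int) * sr) = ((k : Int) + 1) * sr by rw [hcast],
          show ((((k : Nat) + 1 : Nat) : Int) * sc) = ((k : Int) + 1) * sc by rw [hcast]]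
      simp only [pvWalk]
      rw [if_neg hne, hstep1, hstep2, ih f (by omega), List.range_succ]
      simp

-- A's branch value as the canonical forward map
lemma pvA_map (p : Int × Int) (sr sc : Int) (N : Int) (g : Int → Int × Int)
    (hg : ∀ j : Int, g j = (p.1 + j * sr, p.2 + j * sc)) :
    (PySem.List.pyRange 1 N 1).map g
      = (List.range (N - 1).toNat).map (fun (j : Nat) => (p.1 + ((j : Int) + 1) * sr, p.2 + ((j : Int) + 1) * sc)) := by
  rw [PySem.List.pyRange_one, List.map_map]
  refine List.map_congr_left ?_
  intro j _
  simp only [Function.comp_apply, hg]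
  rw [show (1 : Int) + (j : Int) = (j : Int) + 1 by ring]

-- B's value when new_position = position + N·(sr,sc)
lemma pvB_walk (p q : Int × Int) (sr sc : Int) (hs : ¬ (sr = 0 ∧ sc = 0)) (N : Int) (hN : 1 ≤ N)
    (hq1 : q.1 = p.1 + N * sr) (hq2 : q.2 = p.2 + N * sc) (fuel : Nat) (hf : (N - 1).toNat ≤ fuel) :
    (pvWalk p sr sc fuel (q.1 - sr, q.2 - sc)).reverse
      = (List.range (N - 1).toNat).map (fun (j : Nat) => (p.1 + ((j : Int) + 1) * sr, p.2 + ((j : Int) + 1) * sc)) := by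
  have hcast : ((N - 1).toNat : Int) = N - 1 := Int.toNat_of_nonneg (by omega)
  have hstart1 : q.1 - sr = p.1 + ((N - 1).toNat : Int) * sr := by rw [hcast, hq1]; ring
  have hstart2 : q.2 - sc = p.2 + ((N - 1).toNat : Int) * sc := by rw [hcast, hq2]; ring
  rw [hstart1, hstart2, pvWalk_spec p sr sc hs _ fuel hf, List.map_reverse, List.reverse_reverse]

-- ===== VERDICT (by name: the statement is the Claim_ definition above) =====
theorem get_intermediate_locations_spec : Claim_equal_get_intermediate_locations := by
  intro p q _
  unfold Spec_get_intermediate_locations get_intermediate_locations get_intermediate_locations_alt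
  set rd := q.1 - p.1 with hrd
  set cd := q.2 - p.2 with hcd
  by_cases hz : rd = 0 ∧ cd = 0
  · -- same cell: both produce []
    obtain ⟨h1, h2⟩ := hz
    have hq1 : q.1 = p.1 := by omega
    have hq2 : q.2 = p.2 := by omega
    simp [h1, h2, pvWalk, hq1, hq2]
  · by_cases hline : rd = 0 ∨ cd = 0 ∨ |rd| = |cd|
    · -- on a line, at least one step
      have hguard : ¬ (rd ≠ 0 ∧ cd ≠ 0 ∧ |rd| ≠ |cd|) := by tauto
      set sr : Int := (if rd > 0 then 1 else 0) - (if rd < 0 then 1 else 0) with hsr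
      set sc : Int := (if cd > 0 then 1 else 0) - (if cd < 0 then 1 else 0) with hsc
      set N : Int := max |rd| |cd| with hNdef
      have hN : 1 ≤ N := by
        rcases not_and_or.mp hz with h | h
        · exact le_trans (abs_pos.mpr h) (le_max_left _ _)
        · exact le_trans (abs_pos.mpr h) (le_max_right _ _)
      have hrdN : rd = N * sr := by
        by_cases hm : |cd| ≤ |rd|
        · rw [hNdef, max_eq_left hm, hsr]; exact pvSignMul rd
        · -- N = |cd| > |rd|; the line condition forces rd = 0
          have hcdne : cd ≠ 0 := by intro h; rw [h] at hm; simp [abs_nonneg] at hm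
          have habs : |rd| ≠ |cd| := by omega
          have h0 : rd = 0 := by tauto
          simp [h0, hsr]
      have hcdN : cd = N * sc := by
        by_cases hm : |rd| ≤ |cd|
        · rw [hNdef, max_eq_right hm, hsc]; exact pvSignMul cd
        · have hrdne : rd ≠ 0 := by intro h; rw [h] at hm; simp [abs_nonneg] at hm
          have habs : |rd| ≠ |cd| := by omega
          have h0 : cd = 0 := by tauto
          simp [h0, hsc]
      have hs : ¬ (sr = 0 ∧ sc = 0) := by
        rcases not_and_or.mp hz with h | h
        · exact fun ⟨hA, _⟩ => pvSign_ne_zero rd h (by rw [← hsr]; exact hA)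
        · exact fun ⟨_, hB⟩ => pvSign_ne_zero cd h (by rw [← hsc]; exact hB)
      have hq1 : q.1 = p.1 + N * sr := by omega
      have hq2 : q.2 = p.2 + N * sc := by omega
      have hfuel : (N - 1).toNat ≤ (|rd| + |cd|).toNat + 1 := by
        have h1 : N - 1 ≤ |rd| + |cd| := by
          rcases max_cases |rd| |cd| with ⟨hEq, _⟩ | ⟨hEq, _⟩ <;>
            [skip; skip] <;> rw [hNdef, hEq] <;>
            [have := abs_nonneg cd; have := abs_nonneg rd] <;> omega
        calc (N - 1).toNat ≤ (|rd| + |cd|).toNat := Int.toNat_le_toNat h1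
          _ ≤ (|rd| + |cd|).toNat + 1 := Nat.le_succ _
      rw [if_neg hguard]
      have hB := pvB_walk p q sr sc hs N hN hq1 hq2 ((|rd| + |cd|).toNat + 1) hfuel
      rw [hB]
      -- now reduce A's branch to the same canonical map
      by_cases hd : |rd| = |cd|
      · have hrdne : rd ≠ 0 := by
          intro h; apply hz; constructor; · exact h
          · rw [h] at hd; simpa using hd.symm
        have hcdne : cd ≠ 0 := by
          intro h; apply hz; constructor
          · rw [h] at hd; simpa using hd
          · exact h
        have hNr : N = |rd| := by rw [hNdef, hd]; simp
        rw [if_pos hd, ← pvSign_eq rd hrdne, ← pvSign_eq cd hcdne, ← hsr, ← hsc, ← hNr]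
        exact pvA_map p sr sc N _ (fun j => rfl)
      · rcases not_and_or.mp hz with hrdne | hcdne
        · -- rd ≠ 0; line forces cd = 0
          have hcd0 : cd = 0 := by tauto
          have hNr : N = |rd| := by rw [hNdef, hcd0]; simp [abs_nonneg]
          have hsc0 : sc = 0 := by simp [hsc, hcd0]
          rw [if_neg hd, if_neg hrdne, if_pos hcd0, ← pvSign_eq rd hrdne, ← hsr, ← hNr]
          exact pvA_map p sr sc N _ (fun j => by rw [hsc0]; simp)
        · -- cd ≠ 0; line forces rd = 0
          have hrd0 : rd = 0 := by tauto
          have hNc : N = |cd| := by rw [hNdef, hrd0]; simp [abs_nonneg]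
          have hsr0 : sr = 0 := by simp [hsr, hrd0]
          rw [if_neg hd, if_pos hrd0, ← pvSign_eq cd hcdne, ← hsc, ← hNc]
          exact pvA_map p sr sc N _ (fun j => by rw [hsr0]; simp)
    · -- not a line: both produce []
      have h1 : rd ≠ 0 := fun h => hline (Or.inl h)
      have h2 : cd ≠ 0 := fun h => hline (Or.inr (Or.inl h))
      have h3 : |rd| ≠ |cd| := fun h => hline (Or.inr (Or.inr h))
      rw [if_neg (by omega : ¬ |rd| = |cd|), if_neg h1, if_neg h2, if_pos ⟨h1, h2, h3⟩]
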